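-- pv_equiv track=rewrite | github.com/Enzu83/advent-of-code | year-2024/20/puzzle2.py | getCheatTime
-- ===== SOURCE A (Python) =====
-- def getNeighbors(grid, cell, type={'.', 'S', 'E'}):
--     y, x = cell
--
--     neighbors = set()
--
--     if y > 1 and grid[y - 1][x] in type:
--         neighbors.add((y - 1, x))
--
--     if x > 1 and grid[y][x - 1] in type:
--         neighbors.add((y, x - 1))
--
--     if y < len(grid)-2 and grid[y + 1][x] in type:
--         neighbors.add((y + 1, x))
--
--     if x < len(grid[0])-2 and grid[y][x + 1] in type:
--         neighbors.add((y, x + 1))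
--
--     return neighbors
--
-- def getCheatTime(grid, path, wall):
--     # get the neighbors of the wall we will go through
--     # then, follow the path until it mets two of the neighbors
--     # the differences between their indexes in the path corresponds to the time save
--
--     neighbors = getNeighbors(grid, wall)
--
--     shortcut_index = None # beginning of the shortcut
--
--     for i, cell in enumerate(path):
--         if cell in neighbors:
--             # get the beginning of the shortcut
--             if shortcut_index is None:
--                 shortcut_index = i
--
--             # when the second neighbor is found, return the time save ('-2' is the time to go through the wall)
--             else:
--                 return (i - shortcut_index - 2)
--
--     return 0
-- ===== SOURCE B (Python) =====
-- def getCheatTime(grid, path, wall):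
--     # check the four wall-adjacent cells directly (same bounds tests as the
--     # original's getNeighbors) and look each open one up in the path; the two
--     # smallest occurrence indices are the ends of the shortcut
--     y, x = wall
--     cands = ((y - 1, x, y > 1),
--              (y, x - 1, x > 1),
--              (y + 1, x, y < len(grid) - 2),
--              (y, x + 1, x < len(grid[0]) - 2))
--     idxs = sorted(path.index((ny, nx))
--                   for ny, nx, ok in cands
--                   if ok and grid[ny][nx] in ".SE" and (ny, nx) in path)
--     return idxs[1] - idxs[0] - 2 if len(idxs) > 1 else 0
-- ===== Notes on version B (the rewrite author's own statement) =====
-- stated objective: simpler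
-- what changed: Instead of A's indexed forward scan of the whole path with an Option state, an early return at the second hit, and a set-building getNeighbors helper, B tests the four wall-adjacent cells directly with the same bounds/char guards, looks each open one up in the path with path.index, sorts the found indices and subtracts the two smallest.
import Mathlib
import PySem

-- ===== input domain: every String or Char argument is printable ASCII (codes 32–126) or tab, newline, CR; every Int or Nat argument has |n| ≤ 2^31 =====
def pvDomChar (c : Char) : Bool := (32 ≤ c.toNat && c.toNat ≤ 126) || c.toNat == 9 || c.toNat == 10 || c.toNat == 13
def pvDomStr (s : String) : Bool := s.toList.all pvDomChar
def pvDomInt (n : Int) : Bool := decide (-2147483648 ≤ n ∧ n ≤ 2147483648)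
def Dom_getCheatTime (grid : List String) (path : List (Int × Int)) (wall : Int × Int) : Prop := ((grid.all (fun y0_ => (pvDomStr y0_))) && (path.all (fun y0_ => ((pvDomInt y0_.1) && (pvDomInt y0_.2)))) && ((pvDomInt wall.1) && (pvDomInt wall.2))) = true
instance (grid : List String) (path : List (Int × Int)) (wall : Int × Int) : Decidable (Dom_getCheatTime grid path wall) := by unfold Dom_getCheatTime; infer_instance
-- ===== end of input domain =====

-- B replaces A's indexed forward scan of the path (Option state, early return at the
-- second hit) and its set-building getNeighbors helper by direct per-candidate
-- path.index lookups of the four wall-adjacent cells: simpler, same cost.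

-- ===== PORT A =====
-- grid[y][x] under Python indexing (negative wrap; none = IndexError)
def pvCellAt (grid : List String) (y x : Int) : Option Char :=
  (PySem.List.pyGet? grid y).bind (fun row => PySem.Str.pyGet? row x)

-- `grid[y][x] in {'.', 'S', 'E'}` (the membership test of getNeighbors; none never reached inside Pre_)
def pvInType (o : Option Char) : Bool :=
  match o with
  | some c => c == '.' || c == 'S' || c == 'E'
  | none => false

-- one `if cond: neighbors.add(cand)` statement of getNeighbors
def pvAddIf (s : PySem.Set (Int × Int)) (cond : Bool) (cand : Int × Int) : PySem.Set (Int × Int) :=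
  if cond then PySem.Set.add s cand else s

-- A's helper getNeighbors
def getNeighbors (grid : List String) (cell : Int × Int) : List (Int × Int) :=
  let y := cell.1
  let x := cell.2
  pvAddIf
    (pvAddIf
      (pvAddIf
        (pvAddIf PySem.Set.empty
          (y > 1 && pvInType (pvCellAt grid (y - 1) x)) (y - 1, x))
        (x > 1 && pvInType (pvCellAt grid y (x - 1))) (y, x - 1))
      (y < (grid.length : Int) - 2 && pvInType (pvCellAt grid (y + 1) x)) (y + 1, x))
    (x < PySem.Str.len (grid.headD "") - 2 && pvInType (pvCellAt grid y (x + 1))) (y, x + 1)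

-- the `for i, cell in enumerate(path)` loop of A, state = shortcut_index (None at first)
def getCheatTimeLoop (ns : PySem.Set (Int × Int)) :
    List (Int × (Int × Int)) → Option Int → Int
  | [], _ => 0
  | (i, c) :: rest, si =>
    if PySem.Set.contains ns c then
      match si with
      | none => getCheatTimeLoop ns rest (some i)
      | some j => i - j - 2
    else getCheatTimeLoop ns rest si

def getCheatTime (grid : List String) (path : List (Int × Int)) (wall : Int × Int) : Int :=
  getCheatTimeLoop (getNeighbors grid wall) (PySem.List.enumerate path 0) none

-- ===== PORT B =====
-- `grid[ny][nx] in ".SE"` of Source B (substring test on a 1-char string = char membership)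
def pvOpenCell (grid : List String) (ny nx : Int) : Bool :=
  match PySem.List.pyGet? grid ny with
  | none => false
  | some row =>
    match PySem.Str.pyGet? row nx with
    | none => false
    | some ch => ch = '.' ∨ ch = 'S' ∨ ch = 'E'

-- the tuple `cands` of Source B: ((ny, nx, ok) …)
def pvCands (grid : List String) (wall : Int × Int) : List ((Int × Int) × Bool) :=
  [((wall.1 - 1, wall.2), decide (1 < wall.1)),
   ((wall.1, wall.2 - 1), decide (1 < wall.2)),
   ((wall.1 + 1, wall.2), decide (wall.1 < (grid.length : Int) - 2)),
   ((wall.1, wall.2 + 1), decide (wall.2 < PySem.Str.len (grid.headD "") - 2))]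

def getCheatTime_alt (grid : List String) (path : List (Int × Int)) (wall : Int × Int) : Int :=
  let idxs :=
    PySem.List.sorted
      ((pvCands grid wall).filterMap (fun c =>
        if c.2 && pvOpenCell grid c.1.1 c.1.2 && decide (c.1 ∈ path) then
          PySem.List.index? path c.1
        else none))
      (fun i => i) false
  if 1 < idxs.length then (idxs.getD 1 0 : Int) - (idxs.getD 0 0 : Int) - 2 else 0

-- ===== PRECONDITION & SPEC =====
-- Pre_ excludes (a) the inputs on which A's Python raises an IndexError (empty grid, or a
-- guarded neighbor access out of range), and (b) paths in which a wall-adjacent cell occurs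
-- more than once, a defensible corner on which A's first-two-hits scan and B's per-cell
-- first-occurrence lookup are both reasonable readings (a racetrack path never repeats a cell).
def Pre_getCheatTime (grid : List String) (path : List (Int × Int)) (wall : Int × Int) : Prop :=
  grid ≠ [] ∧
  (wall.1 > 1 → pvCellAt grid (wall.1 - 1) wall.2 ≠ none) ∧
  (wall.2 > 1 → pvCellAt grid wall.1 (wall.2 - 1) ≠ none) ∧
  (wall.1 < (grid.length : Int) - 2 → pvCellAt grid (wall.1 + 1) wall.2 ≠ none) ∧
  (wall.2 < PySem.Str.len (grid.headD "") - 2 → pvCellAt grid wall.1 (wall.2 + 1) ≠ none) ∧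
  (∀ c ∈ [((wall.1 - 1 : Int), wall.2), (wall.1, wall.2 - 1), (wall.1 + 1, wall.2),
      (wall.1, wall.2 + 1)], path.count c ≤ 1)

instance (grid : List String) (path : List (Int × Int)) (wall : Int × Int) : Decidable (Pre_getCheatTime grid path wall) := by
  unfold Pre_getCheatTime; infer_instance

def pvWitness_getCheatTime : List String × (List (Int × Int)) × (Int × Int) :=
  (["#####", "#...#", "#.#.#", "#...#", "#####"], [(1, 1), (1, 2), (1, 3), (2, 3)], (2, 2))

def Spec_getCheatTime (grid : List String) (path : List (Int × Int)) (wall : Int × Int) (out : Int) : Prop := out = getCheatTime_alt grid path wall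
instance (grid : List String) (path : List (Int × Int)) (wall : Int × Int) (out : Int) : Decidable (Spec_getCheatTime grid path wall out) := by unfold Spec_getCheatTime; infer_instance

-- ===== CLAIM (what is proved, stated in full; the proofs are below) =====
def Claim_equal_getCheatTime : Prop := ∀ (grid : List String) (path : List (Int × Int)) (wall : Int × Int), Dom_getCheatTime grid path wall → Pre_getCheatTime grid path wall → Spec_getCheatTime grid path wall (getCheatTime grid path wall)

-- ===== LEMMAS AND PROOFS =====

-- getNeighbors is exactly the guard-filtered candidate list of B, in order
theorem pv_neighbors_eq_cands (grid : List String) (wall : Int × Int) :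
    getNeighbors grid wall =
      (pvCands grid wall).filterMap (fun c =>
        if c.2 && pvOpenCell grid c.1.1 c.1.2 then some c.1 else none) := by
  obtain ⟨y, x⟩ := wall
  have hopen : ∀ ny nx, pvOpenCell grid ny nx = pvInType (pvCellAt grid ny nx) := by
    intro ny nx
    unfold pvOpenCell pvInType pvCellAt
    rcases hg : PySem.List.pyGet? grid ny with _ | row
    · rfl
    · simp only [Bool.decide_or, ← Bool.beq_eq_decide_eq, Bool.or_assoc, Option.bind]
      cases PySem.Str.pyGet? row nx <;> rfl
  simp only [getNeighbors, pvCands, pvAddIf, List.filterMap, hopen]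
  split_ifs <;>
    simp_all [PySem.Set.add, PySem.Set.contains, PySem.Set.empty, Prod.ext_iff,
      show ¬(y + 1 = y - 1) by omega, show ¬(x + 1 = x - 1) by omega,
      show ¬(y = y - 1) by omega, show ¬(y = y + 1) by omega,
      show ¬(x = x - 1) by omega, show ¬(x - 1 = x) by omega, show ¬(y + 1 = y) by omega, show ¬(x + 1 = x) by omega]

-- the neighbor set is duplicate-free (it is built with Set.add from Set.empty)
theorem pv_nodup_addIf (s : PySem.Set (Int × Int)) (cond : Bool) (cand : Int × Int)
    (h : s.Nodup) : (pvAddIf s cond cand).Nodup := by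
  unfold pvAddIf
  split
  · exact PySem.Set.nodup_add s cand h
  · exact h

theorem pv_nodup_getNeighbors (grid : List String) (cell : Int × Int) :
    (getNeighbors grid cell).Nodup := by
  unfold getNeighbors
  exact pv_nodup_addIf _ _ _ (pv_nodup_addIf _ _ _ (pv_nodup_addIf _ _ _
    (pv_nodup_addIf _ _ _ (by simp [PySem.Set.empty]))))

-- result shapes of the two programs, as functions of the hit-index list
def pvOut1 (j : Int) : List Int → Int
  | i :: _ => i - j - 2
  | [] => 0

def pvOut2 : List Int → Int
  | i :: j :: _ => j - i - 2
  | _ => 0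

-- A's loop with state `some j` returns (first remaining hit) - j - 2, or 0 if none remains
theorem pv_loop_some (ns : PySem.Set (Int × Int)) (E : List (Int × (Int × Int))) (j : Int) :
    getCheatTimeLoop ns E (some j) =
      pvOut1 j ((E.filter (fun p => decide (p.2 ∈ ns))).map (·.1)) := by
  induction E with
  | nil => simp [getCheatTimeLoop, pvOut1]
  | cons p rest ih =>
    obtain ⟨i, c⟩ := p
    by_cases h : c ∈ ns
    · simp [getCheatTimeLoop, h, pvOut1]
    · simp [getCheatTimeLoop, h, ih]

-- A's loop from the initial state returns second hit - first hit - 2, or 0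
theorem pv_loop_none (ns : PySem.Set (Int × Int)) (E : List (Int × (Int × Int))) :
    getCheatTimeLoop ns E none =
      pvOut2 ((E.filter (fun p => decide (p.2 ∈ ns))).map (·.1)) := by
  induction E with
  | nil => simp [getCheatTimeLoop, pvOut2]
  | cons p rest ih =>
    obtain ⟨i, c⟩ := p
    by_cases h : c ∈ ns
    · simp only [getCheatTimeLoop, List.filter_cons, h, decide_true, if_pos, List.map_cons,
        pv_loop_some]
      cases hm : (rest.filter (fun p => decide (p.2 ∈ ns))).map (·.1) <;>
        simp [pvOut1, pvOut2, h]
    · simp [getCheatTimeLoop, h, ih]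

-- the Nat-level list of hit indices of A's scan
def pvHits (ns : PySem.Set (Int × Int)) (path : List (Int × Int)) : List Nat :=
  (path.zipIdx.filter (fun p => decide (p.1 ∈ ns))).map (·.2)

theorem pv_enum_hits (ns : PySem.Set (Int × Int)) (path : List (Int × Int)) :
    ((PySem.List.enumerate path 0).filter (fun p => decide (p.2 ∈ ns))).map (·.1) =
      (pvHits ns path).map Int.ofNat := by
  rw [PySem.List.enumerate_eq_zipIdx_map, List.filter_map]
  unfold pvHits
  rw [List.map_map, List.map_map]
  congr 1
  funext p
  simp

theorem pv_zipIdx_pairwise (l : List (Int × Int)) (n : Nat) :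
    (l.zipIdx n).Pairwise (fun p q => p.2 < q.2) := by
  induction l generalizing n with
  | nil => simp
  | cons a t ih =>
    rw [List.zipIdx_cons]
    refine List.Pairwise.cons ?_ (ih (n + 1))
    rintro ⟨c, i⟩ hq
    have h := List.mem_zipIdx hq
    simp only
    omega

theorem pv_hits_pairwise (ns : PySem.Set (Int × Int)) (path : List (Int × Int)) :
    (pvHits ns path).Pairwise (· < ·) := by
  unfold pvHits
  exact List.Pairwise.map _ (fun a b h => h) (List.Pairwise.filter _ (pv_zipIdx_pairwise path 0))

theorem pv_mem_hits (ns : PySem.Set (Int × Int)) (path : List (Int × Int)) (k : Nat) :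
    k ∈ pvHits ns path ↔ ∃ h : k < path.length, path[k] ∈ ns := by
  unfold pvHits
  constructor
  · intro hk
    simp only [List.mem_map, List.mem_filter] at hk
    obtain ⟨⟨c, i⟩, ⟨hmem, hc⟩, hik⟩ := hk
    simp only at hik
    have h3 := List.mem_zipIdx hmem
    have hlen : k < path.length := by omega
    refine ⟨hlen, ?_⟩
    have h4 := h3.2.2
    simp only [Nat.sub_zero] at h4
    have hxc : path[k]'hlen = c := by
      subst hik
      exact h4.symm
    rw [hxc]
    simpa using hc
  · rintro ⟨h, hmem⟩
    simp only [List.mem_map, List.mem_filter]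
    refine ⟨(path[k], k), ⟨?_, ?_⟩, rfl⟩
    · exact List.mem_zipIdx_iff_getElem?.mpr (by simp [h])
    · simpa using hmem

-- every neighbor returned by getNeighbors is one of the four wall-adjacent cells
theorem pv_mem_addIf {s : PySem.Set (Int × Int)} {cond : Bool} {cand c : Int × Int}
    (h : c ∈ pvAddIf s cond cand) : c ∈ s ∨ c = cand := by
  unfold pvAddIf at h
  split at h
  · exact (PySem.Set.mem_add s cand c).mp h
  · exact Or.inl h

theorem pv_neighbors_sub (grid : List String) (wall : Int × Int) :
    ∀ c ∈ getNeighbors grid wall,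
      c = (wall.1 - 1, wall.2) ∨ c = (wall.1, wall.2 - 1) ∨
      c = (wall.1 + 1, wall.2) ∨ c = (wall.1, wall.2 + 1) := by
  intro c hc
  unfold getNeighbors at hc
  rcases pv_mem_addIf hc with h3 | h
  · rcases pv_mem_addIf h3 with h2 | h
    · rcases pv_mem_addIf h2 with h1 | h
      · rcases pv_mem_addIf h1 with h0 | h
        · simp [PySem.Set.empty] at h0
        · tauto
      · tauto
    · tauto
  · tauto

-- a cell sitting at two distinct positions of a list occurs at least twice in it
theorem pv_count_two {l : List (Int × Int)} {j k : Nat} (hjk : j < k) (hk : k < l.length)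
    (heq : l[j]'(by omega) = l[k]'hk) : 2 ≤ l.count (l[k]'hk) := by
  have hj : j < l.length := by omega
  have h1 : l[k]'hk ∈ l.take (j + 1) := by
    rw [← heq]
    have hjt : j < (l.take (j + 1)).length := by simp; omega
    have : (l.take (j + 1))[j]'hjt = l[j]'hj := List.getElem_take
    rw [← this]
    exact List.getElem_mem hjt
  have h2 : l[k]'hk ∈ l.drop (j + 1) := by
    have hkd : k - (j + 1) < (l.drop (j + 1)).length := by simp; omega
    have : (l.drop (j + 1))[k - (j + 1)]'hkd = l[k]'hk := by
      rw [List.getElem_drop]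
      congr 1
      omega
    rw [← this]
    exact List.getElem_mem hkd
  have c1 : 0 < (l.take (j + 1)).count (l[k]'hk) := List.count_pos_iff.mpr h1
  have c2 : 0 < (l.drop (j + 1)).count (l[k]'hk) := List.count_pos_iff.mpr h2
  calc 2 ≤ (l.take (j + 1)).count (l[k]'hk) + (l.drop (j + 1)).count (l[k]'hk) := by omega
    _ = ((l.take (j + 1)) ++ l.drop (j + 1)).count (l[k]'hk) := (List.count_append ..).symm
    _ = l.count (l[k]'hk) := by rw [List.take_append_drop]

theorem pv_mem_filterMap (ns : PySem.Set (Int × Int)) (path : List (Int × Int))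
    (hnd : ∀ n ∈ ns, path.count n ≤ 1) (k : Nat) :
    k ∈ ns.filterMap (fun n => PySem.List.index? path n) ↔
      ∃ h : k < path.length, path[k] ∈ ns := by
  simp only [List.mem_filterMap]
  constructor
  · rintro ⟨n, hn, hidx⟩
    obtain ⟨hk, hget, -⟩ := PySem.List.getElem_of_index?_eq_some hidx
    exact ⟨hk, by rwa [hget]⟩
  · rintro ⟨h, hmem⟩
    refine ⟨path[k], hmem, ?_⟩
    rw [PySem.List.index?_eq_idxOf?, List.idxOf?_eq_some_iff]
    refine ⟨h, rfl, ?_⟩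
    intro j hj heq
    have h2 := pv_count_two hj h heq
    have h1 := hnd _ hmem
    omega

-- the collected first-occurrence indices are a rearrangement of the hit indices
theorem pv_perm (ns : PySem.Set (Int × Int)) (path : List (Int × Int))
    (hns : ns.Nodup) (hnd : ∀ n ∈ ns, path.count n ≤ 1) :
    (pvHits ns path).Perm (ns.filterMap (fun n => PySem.List.index? path n)) := by
  have h1 : (pvHits ns path).Nodup := (pv_hits_pairwise ns path).nodup
  have h2 : (ns.filterMap (fun n => PySem.List.index? path n)).Nodup := by
    refine List.Nodup.filterMap ?_ hns
    intro a a' b hb hb'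
    obtain ⟨ha, hga, -⟩ := PySem.List.getElem_of_index?_eq_some hb
    obtain ⟨ha', hga', -⟩ := PySem.List.getElem_of_index?_eq_some hb'
    rw [← hga, ← hga']
  rw [List.perm_ext_iff_of_nodup h1 h2]
  intro k
  rw [pv_mem_hits, pv_mem_filterMap ns path hnd]

-- B's lookup list is getNeighbors' per-element index? lookup, membership guard folded in
theorem pv_alt_list_eq (grid : List String) (path : List (Int × Int)) (wall : Int × Int) :
    ((pvCands grid wall).filterMap (fun c =>
        if c.2 && pvOpenCell grid c.1.1 c.1.2 && decide (c.1 ∈ path) then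
          PySem.List.index? path c.1
        else none)) =
      (getNeighbors grid wall).filterMap (fun n => PySem.List.index? path n) := by
  rw [pv_neighbors_eq_cands, List.filterMap_filterMap]
  congr 1
  funext c
  by_cases hg : (c.2 && pvOpenCell grid c.1.1 c.1.2) = true
  · by_cases hm : c.1 ∈ path
    · simp [hg, hm]
    · simp only [hg, hm, decide_false, Bool.and_false, Bool.false_eq_true, if_false, if_true,
        PySem.List.index?_eq_idxOf?]
      exact (List.idxOf?_eq_none_iff.mpr hm).symm
  · simp [hg]

-- B's sorted lookup list IS the list of hit indices of A's scan
theorem pv_sorted_eq (ns : PySem.Set (Int × Int)) (path : List (Int × Int))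
    (hns : ns.Nodup) (hnd : ∀ n ∈ ns, path.count n ≤ 1) :
    PySem.List.sorted (ns.filterMap (fun n => PySem.List.index? path n)) (fun i => i) false =
      pvHits ns path :=
  PySem.List.sorted_eq_of_perm_of_pairwise_lt _ _ _ (pv_perm ns path hns hnd)
    (pv_hits_pairwise ns path)

-- ===== VERDICT (by name: the statement is the Claim_ definition above) =====
theorem getCheatTime_spec : Claim_equal_getCheatTime := by
  intro grid path wall _ hpre
  have hcnt : ∀ n ∈ getNeighbors grid wall, path.count n ≤ 1 := by
    intro n hn
    rcases pv_neighbors_sub grid wall n hn with h | h | h | h <;>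
      (subst h; exact hpre.2.2.2.2.2 _ (by simp))
  unfold Spec_getCheatTime getCheatTime getCheatTime_alt
  rw [pv_loop_none, pv_enum_hits, pv_alt_list_eq,
    pv_sorted_eq (getNeighbors grid wall) path (pv_nodup_getNeighbors grid wall) hcnt]
  cases pvHits (getNeighbors grid wall) path with
  | nil => simp [pvOut2]
  | cons a t => cases t <;> simp [pvOut2, List.getD]
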